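-- pv_equiv track=rewrite | github.com/JuanCruzMendoza/TP2 | Cuatri2/guia7.py | pares_cero_in
-- ===== SOURCE A (Python) =====
-- def pares_cero_in(s:list[int])->list[int]:
--   output: list[int] = []
--   for i in range(1,len(s)+1):
--     if i % 2 == 0:
--       output.append(0)
--     else:
--       output.append(s[i])
--   return output
-- ===== SOURCE B (Python) =====
-- def pares_cero_in(s: list[int]) -> list[int]:
--     # Recursion on pairs: the front pair contributes its second element
--     # followed by a zero, then recurse on the rest. (On odd-length input the
--     # final one-element tail makes the index-1 access raise IndexError, as the
--     # original does via its 1-based indexing.)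
--     if not s:
--         return []
--     return [s[1], 0] + pares_cero_in(s[2:])
-- ===== Notes on version B (the rewrite author's own statement) =====
-- stated objective: alternative
-- what changed: Replaces the indexed loop with a parity branch by recursion that consumes the list two elements at a time, emitting the pair's second element followed by a zero; no ranges or parity tests remain.
import Mathlib
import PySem

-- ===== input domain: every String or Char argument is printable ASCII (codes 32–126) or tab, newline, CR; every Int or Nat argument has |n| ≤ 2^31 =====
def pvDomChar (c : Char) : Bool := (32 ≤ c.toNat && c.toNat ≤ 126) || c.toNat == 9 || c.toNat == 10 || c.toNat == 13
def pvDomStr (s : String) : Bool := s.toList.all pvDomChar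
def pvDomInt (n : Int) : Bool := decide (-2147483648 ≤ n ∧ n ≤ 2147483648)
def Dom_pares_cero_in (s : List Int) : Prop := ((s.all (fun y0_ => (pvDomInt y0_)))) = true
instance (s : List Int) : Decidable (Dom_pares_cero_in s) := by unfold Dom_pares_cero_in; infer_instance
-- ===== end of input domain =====

-- B replaces A's indexed loop with a parity branch by recursion that
-- consumes the list two elements at a time (objective: alternative).

-- ===== PORT A =====
-- for i in range(1, len(s)+1): append 0 if i even else append s[i].
-- s[i] raises IndexError when i = len(s) is odd (pyGetD's default is never
-- reached inside Pre_, which restricts to even length).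
def pares_cero_in (s : List Int) : List Int :=
  (PySem.List.pyRange 1 ((s.length : Int) + 1) 1).foldl
    (fun output i =>
      if PySem.Int.mod i 2 = 0 then output ++ [0]
      else output ++ [PySem.List.pyGetD s i 0]) []

-- ===== PORT B =====
-- if the list is empty: return []; else emit the element at index 1 and a 0,
-- then recurse on the tail from index 2
-- (inside Pre_ the recursion only ever indexes a list of length >= 2,
-- where pyGetD's default is never reached)
def pares_cero_in_alt (s : List Int) : List Int :=
  if s = [] then []
  else [PySem.List.pyGetD s 1 0, 0] ++ pares_cero_in_alt (PySem.List.slice s (some 2) none)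
termination_by s.length
decreasing_by
  rename_i h
  have h2 := PySem.List.slice_from s (a := 2) (by omega)
  rw [h2]
  have : s.length ≠ 0 := by simpa using h
  simp
  omega

-- ===== PRECONDITION & SPEC =====
-- A raises IndexError (s[i] with 1-based i = len(s)) exactly when len(s) is odd;
-- Pre_ keeps the even lengths, on which A returns (every input A returns on).
def Pre_pares_cero_in (s : List Int) : Prop := s.length % 2 = 0
instance (s : List Int) : Decidable (Pre_pares_cero_in s) := by unfold Pre_pares_cero_in; infer_instance
def pvWitness_pares_cero_in : List Int := ([3, 4] : List Int)

def Spec_pares_cero_in (s : List Int) (out : List Int) : Prop := out = pares_cero_in_alt s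
instance (s : List Int) (out : List Int) : Decidable (Spec_pares_cero_in s out) := by unfold Spec_pares_cero_in; infer_instance

-- ===== CLAIM (what is proved, stated in full; the proofs are below) =====
def Claim_equal_pares_cero_in : Prop := ∀ (s : List Int), Dom_pares_cero_in s → Pre_pares_cero_in s → Spec_pares_cero_in s (pares_cero_in s)

-- ===== LEMMAS AND PROOFS =====

-- A's loop, as a map over List.range.
lemma pvA_eq_map (s : List Int) :
    pares_cero_in s =
      (List.range s.length).map
        (fun k : Nat => if PySem.Int.mod (1 + (k : Int)) 2 = 0 then 0
                  else PySem.List.pyGetD s (1 + (k : Int)) 0) := by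
  unfold pares_cero_in
  have hbody : (fun (output : List Int) (i : Int) =>
      if PySem.Int.mod i 2 = 0 then output ++ [0]
      else output ++ [PySem.List.pyGetD s i 0]) =
      (fun output i => output ++
        [if PySem.Int.mod i 2 = 0 then 0 else PySem.List.pyGetD s i 0]) := by
    funext output i; split <;> rfl
  rw [hbody, PySem.List.foldl_append_singleton_eq_map, PySem.List.pyRange_one]
  have hl : ((s.length : Int) + 1 - 1).toNat = s.length := by omega
  rw [hl, List.map_map, List.nil_append]
  rfl

-- Peeling two elements off the front of A.
lemma pvA_cons2 (a b : Int) (t : List Int) :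
    pares_cero_in (a :: b :: t) = b :: 0 :: pares_cero_in t := by
  rw [pvA_eq_map, pvA_eq_map]
  have hlen : (a :: b :: t).length = t.length + 1 + 1 := by simp
  rw [hlen, List.range_succ_eq_map, List.range_succ_eq_map]
  simp only [List.map_cons, List.map_map]
  have hf1 : PySem.Int.mod (1 + ((0 : Nat) : Int)) 2 = 1 := by decide
  have hf2 : PySem.Int.mod (1 + ((Nat.succ 0 : Nat) : Int)) 2 = 0 := by decide
  congr 1
  · rw [hf1]
    norm_num [pysem]
  rw [hf2, if_pos rfl]
  congr 1
  apply List.map_congr_left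
  intro k _
  simp only [Function.comp_apply]
  have hc1 : (1 + ((k.succ.succ : Nat) : Int)) = ((k + 3 : Nat) : Int) := by push_cast; ring
  have hc2 : (1 + ((k : Nat) : Int)) = ((k + 1 : Nat) : Int) := by push_cast; ring
  rw [hc1, hc2, PySem.List.pyGetD_natCast, PySem.List.pyGetD_natCast]
  have hmod : PySem.Int.mod ((k + 3 : Nat) : Int) 2 = PySem.Int.mod ((k + 1 : Nat) : Int) 2 := by
    simp [PySem.Int.mod, Int.fmod_eq_emod]
    omega
  rw [hmod]
  have hget : (a :: b :: t).getD (k + 3) 0 = t.getD (k + 1) 0 := by simp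
  rw [hget]

-- B on a pair-headed list.
lemma pvB_cons2 (a b : Int) (t : List Int) :
    pares_cero_in_alt (a :: b :: t) = b :: 0 :: pares_cero_in_alt t := by
  rw [pares_cero_in_alt, if_neg (by simp)]
  have h2 := PySem.List.slice_from (a :: b :: t) (a := 2) (by omega)
  rw [h2]
  norm_num [pysem]
  rfl

-- Main induction, two elements at a time.
lemma pvMain : ∀ (m : Nat) (s : List Int), s.length = 2 * m →
    pares_cero_in s = pares_cero_in_alt s := by
  intro m
  induction m with
  | zero =>
    intro s hs
    have : s = [] := List.eq_nil_of_length_eq_zero (by omega)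
    subst this
    rw [pares_cero_in_alt]
    simp [pares_cero_in, PySem.List.pyRange_one_eq_nil]
  | succ m ih =>
    intro s hs
    match s with
    | a :: b :: t =>
      have ht : t.length = 2 * m := by simp at hs; omega
      rw [pvA_cons2, pvB_cons2, ih t ht]
    | [] => simp at hs
    | [a] => simp at hs; omega

-- ===== VERDICT (by name: the statements are the Claim_ definitions above) =====
theorem pares_cero_in_spec : Claim_equal_pares_cero_in := by
  intro s _ hpre
  unfold Pre_pares_cero_in at hpre
  unfold Spec_pares_cero_in
  exact pvMain (s.length / 2) s (by omega)
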